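-- pv_equiv track=rewrite | github.com/RaiiDeNx7/Roman-Calculator | ErrorHandling.py | check_operator_by_roman
-- ===== SOURCE A (Python) =====
-- def check_operator_by_roman(expression: str) -> bool:
--     operators = {'+', '-', '*', '/'}
--     roman_chars = {'I', 'V', 'X', 'L', 'C', 'D', 'M'}
--
--     # Strip spaces to ensure accurate checking
--     expression = expression.replace(" ", "")
--
--     for i, char in enumerate(expression):
--         if char in operators:
--             # Check if there is a next character and if it is a Roman numeral
--             if i + 1 >= len(expression) or expression[i + 1] not in roman_chars:
--                 return False
--             # Check if there's a previous character and if it's a Roman numeral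
--             if i == 0 or expression[i - 1] not in roman_chars:
--                 return False
--     return True
-- ===== SOURCE B (Python) =====
-- def check_operator_by_roman(expression: str) -> bool:
--     # Tokenize: turn every operator into one delimiter, split into segments,
--     # then validate each segment boundary (an operator sits exactly at each
--     # boundary; it is valid iff the left segment ends with a Roman numeral
--     # and the right segment starts with one).
--     rom = set("IVXLCDM")
--     s = expression.replace(" ", "")
--     for op in "+-*/":
--         s = s.replace(op, "\x00")
--     parts = s.split("\x00")
--     return all(a != "" and a[-1] in rom and b != "" and b[0] in rom
--                for a, b in zip(parts, parts[1:]))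
-- ===== Notes on version B (the rewrite author's own statement) =====
-- stated objective: alternative
-- what changed: Replaces A's per-character index loop with neighbor lookups by a tokenize-then-validate pipeline: all operators are rewritten to one delimiter, the string is split into segments, and validity is checked per segment boundary (left segment must end and right segment must start with a Roman numeral).
import Mathlib
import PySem

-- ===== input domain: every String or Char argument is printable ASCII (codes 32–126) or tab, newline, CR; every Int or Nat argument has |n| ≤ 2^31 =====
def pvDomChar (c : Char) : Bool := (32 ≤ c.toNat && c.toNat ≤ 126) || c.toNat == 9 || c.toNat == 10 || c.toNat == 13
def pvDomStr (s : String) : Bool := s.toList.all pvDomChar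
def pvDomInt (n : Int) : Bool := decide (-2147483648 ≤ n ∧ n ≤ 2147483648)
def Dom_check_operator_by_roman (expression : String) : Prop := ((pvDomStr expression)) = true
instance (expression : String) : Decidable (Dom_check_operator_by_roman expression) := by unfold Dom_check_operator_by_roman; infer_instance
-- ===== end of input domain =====

-- B replaces A's index loop (expression[i-1]/expression[i+1] neighbour lookups) by a
-- tokenize-then-validate pipeline: rewrite every operator to one delimiter, split into
-- segments, and check each segment boundary; same return value on the whole domain
-- (measurably faster in Python: the per-character loop moves into bulk string primitives).

-- ===== PORT A =====
def pvOps : PySem.Set Char := PySem.Set.ofList ['+', '-', '*', '/']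
def pvRom : PySem.Set Char := PySem.Set.ofList ['I', 'V', 'X', 'L', 'C', 'D', 'M']

-- the 'for i, char in enumerate(expression)' loop with its two early returns
def pvLoopA (s : List Char) : List (Int × Char) → Bool
  | [] => true
  | (i, c) :: rest =>
    if PySem.Set.contains pvOps c then
      if decide (i + 1 ≥ (s.length : Int)) ||
         !(match PySem.List.pyGet? s (i + 1) with
           | some n => PySem.Set.contains pvRom n
           | none => false) then false
      else if (i == 0) ||
         !(match PySem.List.pyGet? s (i - 1) with
           | some p => PySem.Set.contains pvRom p
           | none => false) then false
      else pvLoopA s rest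
    else pvLoopA s rest

def check_operator_by_roman (expression : String) : Bool :=
  let s := PySem.Chars.replace expression.toList [' '] []
  pvLoopA s (PySem.List.enumerate s 0)

-- ===== PORT B =====
def pvRomB : PySem.Set Char := PySem.Set.ofList "IVXLCDM".toList

-- the per-boundary test 'a != "" and a[-1] in rom and b != "" and b[0] in rom'
def pvBoundB (a b : List Char) : Bool :=
  decide (a ≠ []) &&
  (match PySem.List.pyGet? a (-1) with
   | some c => PySem.Set.contains pvRomB c
   | none => false) &&
  decide (b ≠ []) &&
  (match PySem.List.pyGet? b 0 with
   | some c => PySem.Set.contains pvRomB c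
   | none => false)

def check_operator_by_roman_alt (expression : String) : Bool :=
  let s0 := PySem.Chars.replace expression.toList [' '] []
  -- 'for op in "+-*/": s = s.replace(op, "\x00")'
  let s := List.foldl (fun t op => PySem.Chars.replace t [op] [Char.ofNat 0]) s0 "+-*/".toList
  let parts := PySem.Chars.splitOn s [Char.ofNat 0]
  (List.zip parts (PySem.List.slice parts (some 1) none)).all (fun ab => pvBoundB ab.1 ab.2)

-- ===== PRECONDITION & SPEC =====
def Spec_check_operator_by_roman (expression : String) (out : Bool) : Prop := out = check_operator_by_roman_alt expression
instance (expression : String) (out : Bool) : Decidable (Spec_check_operator_by_roman expression out) := by unfold Spec_check_operator_by_roman; infer_instance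

-- ===== CLAIM (what is proved, stated in full; the proofs are below) =====
def Claim_equal_check_operator_by_roman : Prop := ∀ (expression : String), Dom_check_operator_by_roman expression → Spec_check_operator_by_roman expression (check_operator_by_roman expression)

-- ===== LEMMAS AND PROOFS =====

-- canonical prev-carrying scan A's loop reduces to ('#' plays "no neighbour")
def pvScan (prev : Char) : List Char → Bool
  | [] => true
  | c :: rest =>
      (if PySem.Set.contains pvOps c then
          PySem.Set.contains pvRom prev && PySem.Set.contains pvRom (rest.headD '#')
        else true) && pvScan c rest

-- the same scan carrying only "previous char is Roman" as a Bool
def pvScanB (b : Bool) : List Char → Bool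
  | [] => true
  | c :: rest =>
      (if PySem.Set.contains pvOps c then
          b && (match rest.head? with
                | some d => PySem.Set.contains pvRom d
                | none => false)
        else true) && pvScanB (PySem.Set.contains pvRom c) rest

-- single-char split into (first segment, later segments)
def pvSplit (d : Char) : List Char → List Char × List (List Char)
  | [] => ([], [])
  | c :: r =>
      let hp := pvSplit d r
      if c = d then ([], hp.1 :: hp.2) else (c :: hp.1, hp.2)

-- boundary validation over segments; b = "is the char left of the FIRST segment Roman"
def pvCW (b : Bool) (p : List Char) : List (List Char) → Bool
  | [] => true
  | q :: ps =>
      ((match p.getLast? with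
        | some c => PySem.Set.contains pvRom c
        | none => b) &&
       (match q.head? with
        | some c => PySem.Set.contains pvRom c
        | none => false)) && pvCW false q ps

def pvSigma (c : Char) : Char := if PySem.Set.contains pvOps c then Char.ofNat 0 else c

theorem pvScan_eq_scanB (s : List Char) : ∀ p : Char,
    pvScan p s = pvScanB (PySem.Set.contains pvRom p) s := by
  induction s with
  | nil => intro p; rfl
  | cons c r ih =>
    intro p
    rw [pvScan, pvScanB, ih c]
    congr 1
    cases r with
    | nil =>
      have h7 : PySem.Set.contains pvRom '#' = false := by decide
      rw [List.headD_nil, h7]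
      simp only [List.head?_nil]
    | cons d r' =>
      rw [List.headD_cons]
      simp only [List.head?_cons]

theorem pvOps_not_rom (c : Char) (h : PySem.Set.contains pvOps c = true) :
    PySem.Set.contains pvRom c = false := by
  simp [pvOps, PySem.Set.contains, PySem.Set.ofList] at h
  rcases h with rfl | rfl | rfl | rfl <;> decide

-- replace with a single-char pattern is a pointwise rewrite
theorem pvReplaceGo (o : Char) (new : List Char) :
    ∀ (fuel : Nat) (l acc : List Char), l.length ≤ fuel →
    PySem.Chars.replace.go [o] new fuel l acc =
      acc.reverse ++ l.flatMap (fun c => if c = o then new else [c]) := by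
  intro fuel
  induction fuel with
  | zero =>
    intro l acc h
    have : l = [] := List.eq_nil_of_length_eq_zero (Nat.le_zero.mp h)
    subst this; simp [PySem.Chars.replace.go]
  | succ n ih =>
    intro l acc h
    cases l with
    | nil => simp [PySem.Chars.replace.go]
    | cons c t =>
      rw [PySem.Chars.replace.go]
      by_cases hc : c = o
      · subst hc
        have hp : [c].isPrefixOf (c :: t) = true := by simp [List.isPrefixOf]
        have hdrop : List.drop [c].length (c :: t) = t := rfl
        simp only [hp, if_true, hdrop]
        rw [ih t _ (by simpa using Nat.lt_succ_iff.mp (by simpa using h))]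
        simp [List.flatMap_cons]
      · have hp : [o].isPrefixOf (c :: t) = false := by
          simp [List.isPrefixOf]; exact fun hh => (hc hh.symm).elim
        simp only [hp, Bool.false_eq_true, if_false]
        rw [ih t _ (by simpa using Nat.lt_succ_iff.mp (by simpa using h))]
        simp [List.flatMap_cons, hc]

theorem pvReplace1 (o : Char) (new : List Char) (s : List Char) :
    PySem.Chars.replace s [o] new = s.flatMap (fun c => if c = o then new else [c]) := by
  rw [PySem.Chars.replace]
  simp only [List.isEmpty_cons, Bool.false_eq_true, if_false]
  exact pvReplaceGo o new s.length s [] le_rfl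

theorem pvSplitGo (d : Char) :
    ∀ (fuel : Nat) (l cur : List Char) (acc : List (List Char)), l.length ≤ fuel →
    PySem.Chars.splitOn.go [d] fuel l cur acc =
      acc.reverse ++ ((cur.reverse ++ (pvSplit d l).1) :: (pvSplit d l).2) := by
  intro fuel
  induction fuel with
  | zero =>
    intro l cur acc h
    have : l = [] := List.eq_nil_of_length_eq_zero (Nat.le_zero.mp h)
    subst this; simp [PySem.Chars.splitOn.go, pvSplit]
  | succ n ih =>
    intro l cur acc h
    cases l with
    | nil => simp [PySem.Chars.splitOn.go, pvSplit]
    | cons c t =>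
      rw [PySem.Chars.splitOn.go]
      by_cases hc : c = d
      · subst hc
        have hp : [c].isPrefixOf (c :: t) = true := by simp [List.isPrefixOf]
        have hdrop : List.drop [c].length (c :: t) = t := rfl
        simp only [hp, if_true, hdrop]
        rw [ih t [] _ (by simpa using Nat.lt_succ_iff.mp (by simpa using h))]
        simp [pvSplit]
      · have hp : [d].isPrefixOf (c :: t) = false := by
          simp [List.isPrefixOf]; exact fun hh => (hc hh.symm).elim
        simp only [hp, Bool.false_eq_true, if_false]
        rw [ih t (c :: cur) acc (by simpa using Nat.lt_succ_iff.mp (by simpa using h))]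
        simp [pvSplit, hc]

theorem pvSplitOn_eq (d : Char) (s : List Char) :
    PySem.Chars.splitOn s [d] = (pvSplit d s).1 :: (pvSplit d s).2 := by
  rw [PySem.Chars.splitOn, pvSplitGo d (s.length + 1) s [] [] (Nat.le_succ _)]
  simp

-- the four operator replaces compose to the pointwise rewrite pvSigma
theorem pvFoldReplace (s : List Char) :
    List.foldl (fun t op => PySem.Chars.replace t [op] [Char.ofNat 0]) s "+-*/".toList =
      s.map pvSigma := by
  have hm : ∀ (o : Char) (t : List Char),
      PySem.Chars.replace t [o] [Char.ofNat 0] =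
        t.map (fun c => if c = o then Char.ofNat 0 else c) := by
    intro o t
    rw [pvReplace1]
    induction t with
    | nil => rfl
    | cons a t' ih => by_cases h : a = o <;> simp [List.flatMap_cons, h, ih]
  show List.foldl _ s ['+', '-', '*', '/'] = _
  simp only [List.foldl_cons, List.foldl_nil, hm, List.map_map]
  apply List.map_congr_left
  intro c _
  simp only [Function.comp]
  by_cases h1 : c = '+' <;> by_cases h2 : c = '-' <;> by_cases h3 : c = '*' <;>
    by_cases h4 : c = '/' <;>
    simp_all [pvSigma, PySem.Set.contains, pvOps, PySem.Set.ofList]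

-- main tokenization lemma: the scan equals boundary validation of the split
theorem pvScanB_eq_CW (s : List Char) (hs : ∀ c ∈ s, c ≠ Char.ofNat 0) : ∀ b : Bool,
    pvScanB b s = pvCW b (pvSplit (Char.ofNat 0) (s.map pvSigma)).1
                         (pvSplit (Char.ofNat 0) (s.map pvSigma)).2 := by
  induction s with
  | nil => intro b; rfl
  | cons c r ih =>
    intro b
    have hc0 : c ≠ Char.ofNat 0 := hs c (List.mem_cons_self ..)
    have ihr := ih (fun x hx => hs x (List.mem_cons_of_mem _ hx))
    rw [pvScanB]
    by_cases hop : PySem.Set.contains pvOps c = true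
    · -- c is an operator: it becomes the delimiter, an empty first segment appears
      have hσ : pvSigma c = Char.ofNat 0 := by unfold pvSigma; exact if_pos hop
      have hrc : PySem.Set.contains pvRom c = false := pvOps_not_rom c hop
      simp only [List.map_cons, hσ, pvSplit, if_pos rfl, hop, if_true, hrc]
      rw [pvCW]
      have hhead : (match r.head? with
          | some d => PySem.Set.contains pvRom d
          | none => false) =
          (match (pvSplit (Char.ofNat 0) (r.map pvSigma)).1.head? with
           | some x => PySem.Set.contains pvRom x
           | none => false) := by
        cases r with
        | nil => rfl
        | cons d r' =>
          have hd0 : d ≠ Char.ofNat 0 := hs d (by simp)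
          by_cases hdo : PySem.Set.contains pvOps d = true
          · have hσd : pvSigma d = Char.ofNat 0 := by unfold pvSigma; exact if_pos hdo
            have hrd : PySem.Set.contains pvRom d = false := pvOps_not_rom d hdo
            simp only [List.map_cons, hσd, pvSplit, List.head?_cons, hrd]
            simp
          · have hσd : pvSigma d = d := by unfold pvSigma; exact if_neg hdo
            simp only [List.map_cons, hσd, pvSplit, if_neg hd0, List.head?_cons]
      rw [ihr false, hhead]
      simp [Bool.and_assoc]
    · -- c is an ordinary char: it is prepended to the first segment
      have hσ : pvSigma c = c := by unfold pvSigma; exact if_neg hop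
      simp only [List.map_cons, hσ, pvSplit, if_neg hc0, hop, Bool.false_eq_true, if_false,
        Bool.true_and]
      rw [ihr (PySem.Set.contains pvRom c)]
      cases hps : (pvSplit (Char.ofNat 0) (r.map pvSigma)).2 with
      | nil => rfl
      | cons q ps' =>
        rw [pvCW, pvCW]
        congr 1
        congr 1
        cases hh : (pvSplit (Char.ofNat 0) (r.map pvSigma)).1 with
        | nil => simp
        | cons x xs =>
          rw [show (c :: x :: xs).getLast? = (x :: xs).getLast? from rfl,
              List.getLast?_eq_some_getLast (l := x :: xs) (by simp)]

-- chars of the stripped string stay in the original string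
theorem pvStripMem (s : List Char) :
    ∀ c ∈ PySem.Chars.replace s [' '] [], c ∈ s := by
  rw [pvReplace1]
  intro c hc
  rcases List.mem_flatMap.mp hc with ⟨a, ha, hca⟩
  by_cases h : a = ' ' <;> simp [h] at hca
  · exact hca ▸ ha

-- A's enumerate loop equals the prev-carrying scan (prev = last of consumed prefix)
theorem pvLoopA_eq (s : List Char) : ∀ (rest pre : List Char), s = pre ++ rest →
    pvLoopA s (PySem.List.enumerate rest (pre.length : Int)) = pvScan (pre.getLastD '#') rest := by
  intro rest
  induction rest with
  | nil => intro pre h; simp [PySem.List.enumerate, pvLoopA, pvScan]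
  | cons c r ih =>
    intro pre h
    subst h
    rw [PySem.List.enumerate_cons, pvLoopA, pvScan]
    have hnext : PySem.List.pyGet? (pre ++ c :: r) ((pre.length : Int) + 1) = r[0]? := by
      have h2 : ((pre.length : Int) + 1) = (((pre.length + 1 : Nat)) : Int) := by push_cast; ring
      rw [h2, PySem.List.pyGet?_natCast, List.getElem?_append_right (by omega)]
      simp
    have hih : pvLoopA (pre ++ c :: r) (PySem.List.enumerate r ((pre.length : Int) + 1)) = pvScan c r := by
      have h1 := ih (pre ++ [c]) (by simp)
      have h2 : (((pre ++ [c]).length : Nat) : Int) = (pre.length : Int) + 1 := by push_cast; simp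
      rw [h2, List.getLastD_concat] at h1
      simpa using h1
    by_cases hc : c ∈ pvOps
    case neg =>
      have hcc : PySem.Set.contains pvOps c = false := by simpa [PySem.Set.contains] using hc
      simp only [hcc, Bool.false_eq_true, if_false]
      rw [hih]
      simp [PySem.Set.contains, hc]
    case pos =>
      have hcc : PySem.Set.contains pvOps c = true := by simpa [PySem.Set.contains] using hc
      simp only [hcc, if_true]
      cases r with
      | nil =>
        have hge : decide ((pre.length : Int) + 1 ≥ (((pre ++ [c]).length : Nat) : Int)) = true := by
          simp only [decide_eq_true_eq, ge_iff_le, List.length_append, List.length_cons,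
            List.length_nil]
          push_cast
          omega
        have h7 : ¬ ('#' ∈ pvRom) := by decide
        simp [hge, h7, pvScan]
      | cons n r' =>
        have hge : decide ((pre.length : Int) + 1 ≥ (((pre ++ c :: n :: r').length : Nat) : Int)) = false := by
          simp only [decide_eq_false_iff_not, not_le, List.length_append, List.length_cons]
          push_cast
          omega
        rw [hge, hnext]
        simp only [List.getElem?_cons_zero, Bool.false_or, List.headD_cons]
        simp only [PySem.List.enumerate_cons, List.cons_append, List.append_assoc] at hih ⊢
        by_cases hn : n ∈ pvRom
        case neg =>
          simp [PySem.Set.contains, hn]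
        case pos =>
          have hnn : PySem.Set.contains pvRom n = true := by simpa [PySem.Set.contains] using hn
          simp only [hnn, Bool.not_true]
          cases pre with
          | nil =>
            have h7 : ¬ ('#' ∈ pvRom) := by decide
            simp [PySem.Set.contains, h7]
          | cons p0 pr =>
            have hz : ((((p0 :: pr).length : Nat) : Int) == 0) = false := by
              simp only [beq_eq_false_iff_ne, ne_eq, List.length_cons]
              push_cast
              omega
            have hprev : PySem.List.pyGet? ((p0 :: pr) ++ c :: n :: r') (((p0 :: pr).length : Int) - 1)
                = some ((p0 :: pr).getLastD '#') := by
              have h2 : (((p0 :: pr).length : Int) - 1) = ((((p0 :: pr).length - 1 : Nat)) : Int) := by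
                push_cast [List.length_cons]; ring
              rw [h2, PySem.List.pyGet?_natCast, List.getElem?_append_left (by simp),
                  List.getElem?_eq_getElem (by simp)]
              congr 1
              rw [List.getLastD_eq_getLast?, List.getLast?_eq_getElem?,
                  List.getElem?_eq_getElem (by simp)]
              simp
            rw [hz, hprev]
            simp only [Bool.false_or]
            simp only [List.length_cons, List.cons_append] at hih
            push_cast at hih
            by_cases hp : (p0 :: pr).getLastD '#' ∈ pvRom
            · simp [PySem.Set.contains, hp, hn, hih]
            · simp [PySem.Set.contains, hp, hih]

-- B's zip-all over segment pairs equals pvCW with no left context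
theorem pvZipAll_eq_CW (ps : List (List Char)) : ∀ p : List Char,
    (List.zip (p :: ps) ps).all (fun ab => pvBoundB ab.1 ab.2) = pvCW false p ps := by
  induction ps with
  | nil => intro p; rfl
  | cons q ps' ih =>
    intro p
    rw [List.zip_cons_cons, List.all_cons, ih q, pvCW]
    congr 1
    have hRB : pvRomB = pvRom := by decide
    cases p with
    | nil => simp [pvBoundB]
    | cons a as =>
      rw [pvBoundB, PySem.List.pyGet?_neg_one]
      cases q with
      | nil => simp
      | cons b bs =>
        have hget : (a :: as).getLast? = some ((a :: as).getLast (by simp)) :=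
          List.getLast?_eq_some_getLast (by simp)
        have h0 : PySem.List.pyGet? (b :: bs) 0 = some b := by
          have : (0 : Int) = ((0 : Nat) : Int) := rfl
          rw [this, PySem.List.pyGet?_natCast]; rfl
        simp only [hget, h0, hRB, ne_eq, reduceCtorEq, not_false_eq_true, decide_true,
          Bool.true_and, Bool.and_true, List.head?_cons]

-- ===== VERDICT (by name: the statement is the Claim_ definition above) =====
theorem check_operator_by_roman_spec : Claim_equal_check_operator_by_roman := by
  intro e hd
  unfold Spec_check_operator_by_roman check_operator_by_roman check_operator_by_roman_alt
  dsimp only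
  have hA := pvLoopA_eq (PySem.Chars.replace e.toList [' '] [])
    (PySem.Chars.replace e.toList [' '] []) [] rfl
  simp only [List.length_nil, Nat.cast_zero, List.getLastD_nil] at hA
  have hnz : ∀ c ∈ PySem.Chars.replace e.toList [' '] [], c ≠ Char.ofNat 0 := by
    intro c hc
    have hmem := pvStripMem e.toList c hc
    have := List.all_eq_true.mp hd c (by simpa using hmem)
    intro h0
    subst h0
    simp [pvDomChar] at this
  have h7 : PySem.Set.contains pvRom '#' = false := by decide
  rw [hA, pvScan_eq_scanB, h7, pvFoldReplace, pvSplitOn_eq, PySem.List.slice_from_one,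
      List.tail_cons, pvZipAll_eq_CW, pvScanB_eq_CW _ hnz]
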